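-- pv_equiv track=rewrite | github.com/MarcMunta/KlimeAI | c3_rnt2_ai/src/c3rnt2/model/bad_decode.py | _no_repeat_ngram_mask
-- ===== SOURCE A (Python) =====
-- from typing import List, Tuple
--
-- def _no_repeat_ngram_mask(generated: List[int], no_repeat_ngram: int) -> set[int]:
--     if no_repeat_ngram <= 0 or len(generated) < no_repeat_ngram - 1:
--         return set()
--     n = no_repeat_ngram
--     ngrams = {}
--     for i in range(len(generated) - n + 1):
--         prev = tuple(generated[i : i + n - 1])
--         nxt = generated[i + n - 1]
--         ngrams.setdefault(prev, set()).add(nxt)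
--     prefix = tuple(generated[-(n - 1) :])
--     return ngrams.get(prefix, set())
-- ===== SOURCE B (Python) =====
-- def _no_repeat_ngram_mask(generated, no_repeat_ngram):
--     if no_repeat_ngram <= 0 or len(generated) < no_repeat_ngram - 1:
--         return set()
--     k = no_repeat_ngram - 1
--     prefix = generated[-k:]
--     out = set()
--     window = []
--     for x in generated:
--         if len(window) == k and window == prefix:
--             out.add(x)
--         window.append(x)
--         if len(window) > k:
--             del window[0]
--     return out
-- ===== Notes on version B (the rewrite author's own statement) =====
-- stated objective: alternative
-- what changed: B replaces A's dict grouping every (n-1)-gram of the sequence by a single element-wise pass that maintains a sliding window of the previous n-1 tokens and collects the next token whenever the window equals the trailing prefix.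
import Mathlib
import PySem

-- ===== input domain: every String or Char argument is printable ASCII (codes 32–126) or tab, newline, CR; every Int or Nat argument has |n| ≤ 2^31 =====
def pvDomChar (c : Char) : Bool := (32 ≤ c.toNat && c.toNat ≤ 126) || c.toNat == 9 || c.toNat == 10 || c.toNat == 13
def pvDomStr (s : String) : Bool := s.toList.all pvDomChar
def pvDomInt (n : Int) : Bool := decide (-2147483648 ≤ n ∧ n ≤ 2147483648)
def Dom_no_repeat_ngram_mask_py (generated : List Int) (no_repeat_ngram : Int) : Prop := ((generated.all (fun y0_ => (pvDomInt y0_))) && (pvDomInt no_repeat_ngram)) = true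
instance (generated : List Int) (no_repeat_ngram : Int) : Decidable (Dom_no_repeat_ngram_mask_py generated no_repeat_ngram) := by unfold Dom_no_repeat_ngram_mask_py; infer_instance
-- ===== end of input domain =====

-- B replaces A's dict of all (n-1)-grams by a single element-wise pass that slides a window
-- of the previous n-1 tokens and collects the token whenever the window equals the trailing
-- prefix (objective: alternative).

-- ===== PORT A =====
def no_repeat_ngram_mask_py (generated : List Int) (no_repeat_ngram : Int) : List Int :=
  if no_repeat_ngram ≤ 0 ∨ (generated.length : Int) < no_repeat_ngram - 1 then []
  else
    let n := no_repeat_ngram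
    let ngrams : PySem.Dict (List Int) (PySem.Set Int) :=
      (PySem.List.pyRange 0 ((generated.length : Int) - n + 1) 1).foldl
        (fun d i =>
          -- ngrams.setdefault(prev, set()).add(nxt)  ==  d[prev] = d.get(prev, set()) ∪ {nxt}
          let prev := PySem.List.slice generated (some i) (some (i + n - 1))
          -- generated[i+n-1]: the index is always in range for i produced by this range
          let nxt := PySem.List.pyGetD generated (i + n - 1) 0
          d.modify prev PySem.Set.empty (fun s => s.add nxt))
        PySem.Dict.empty
    let pref := PySem.List.slice generated (some (-(n - 1))) none
    ngrams.getD pref PySem.Set.empty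

-- ===== PORT B =====
def no_repeat_ngram_mask_py_alt (generated : List Int) (no_repeat_ngram : Int) : List Int :=
  if no_repeat_ngram ≤ 0 ∨ (generated.length : Int) < no_repeat_ngram - 1 then []
  else
    let k := (no_repeat_ngram - 1).toNat
    -- prefix = generated[-k:]  (k = no_repeat_ngram - 1)
    let pref := PySem.List.slice generated (some (-(no_repeat_ngram - 1))) none
    (generated.foldl
      (fun st x =>
        let out := if st.1.length = k ∧ st.1 = pref then PySem.Set.add st.2 x else st.2
        let w := st.1 ++ [x]
        (if k < w.length then w.drop 1 else w, out))
      ([], PySem.Set.empty)).2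

-- ===== PRECONDITION & SPEC =====
def Spec_no_repeat_ngram_mask_py (generated : List Int) (no_repeat_ngram : Int) (out : List Int) : Prop := out = no_repeat_ngram_mask_py_alt generated no_repeat_ngram
instance (generated : List Int) (no_repeat_ngram : Int) (out : List Int) : Decidable (Spec_no_repeat_ngram_mask_py generated no_repeat_ngram out) := by unfold Spec_no_repeat_ngram_mask_py; infer_instance

-- ===== CLAIM (what is proved, stated in full; the proofs are below) =====
def Claim_equal_no_repeat_ngram_mask_py : Prop := ∀ (generated : List Int) (no_repeat_ngram : Int), Dom_no_repeat_ngram_mask_py generated no_repeat_ngram → Spec_no_repeat_ngram_mask_py generated no_repeat_ngram (no_repeat_ngram_mask_py generated no_repeat_ngram)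

-- ===== LEMMAS AND PROOFS =====

-- The value A's grouping-dict fold holds at key p is the filtered fold of the adds whose key is p.
theorem fold_modify_getD (key : Int → List Int) (val : Int → Int) (p : List Int)
    (l : List Int) (d : PySem.Dict (List Int) (PySem.Set Int)) :
    (l.foldl (fun d i => d.modify (key i) PySem.Set.empty (fun s => s.add (val i))) d).getD p PySem.Set.empty
    = l.foldl (fun s i => if key i = p then PySem.Set.add s (val i) else s) (d.getD p PySem.Set.empty) := by
  induction l generalizing d with
  | nil => rfl
  | cons i l ih =>
      simp only [List.foldl_cons]
      rw [ih]
      congr 1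
      rw [PySem.Dict.getD_modify]
      by_cases h : key i = p
      · rw [if_pos h.symm, if_pos h, h]
      · rw [if_neg (fun hp => h hp.symm), if_neg h]

-- B's one-pass fold: the window is the last min(k, |g|) elements, and the collected set is
-- A's filtered fold over the window start positions.
theorem window_fold (k : Nat) (p : List Int) (g : List Int) (acc : PySem.Set Int) :
    g.foldl
      (fun st x =>
        let out := if st.1.length = k ∧ st.1 = p then PySem.Set.add st.2 x else st.2
        let w := st.1 ++ [x]
        (if k < w.length then w.drop 1 else w, out))
      ([], acc)
    = (g.drop (g.length - k),
       (PySem.List.pyRange 0 ((g.length : Int) - k) 1).foldl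
         (fun s i => if PySem.List.slice g (some i) (some (i + (k : Int))) = p
                     then PySem.Set.add s (PySem.List.pyGetD g (i + (k : Int)) 0) else s) acc) := by
  induction g using List.reverseRecOn with
  | nil =>
      rw [PySem.List.pyRange_one_eq_nil (by simp : ((([] : List Int).length : Int) - k ≤ 0))]
      simp
  | append_singleton g x ih =>
      rw [List.foldl_append, ih]
      simp only [List.foldl_cons, List.foldl_nil]
      have hL1 : ((g ++ [x]).length : Int) - k = ((g.length : Int) - k) + 1 := by
        simp; omega
      rw [hL1]
      by_cases hk : k ≤ g.length
      · have hlen : (g.drop (g.length - k)).length = k := by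
          simp [List.length_drop]; omega
        rw [PySem.List.pyRange_one_succ_right (by omega : (0:Int) ≤ (g.length : Int) - k)]
        rw [List.foldl_append]
        simp only [List.foldl_cons, List.foldl_nil]
        have hcong : List.foldl
            (fun s i => if PySem.List.slice (g ++ [x]) (some i) (some (i + (k : Int))) = p
                     then PySem.Set.add s (PySem.List.pyGetD (g ++ [x]) (i + (k : Int)) 0) else s)
            acc (PySem.List.pyRange 0 ((g.length : Int) - k) 1)
          = List.foldl
            (fun s i => if PySem.List.slice g (some i) (some (i + (k : Int))) = p
                     then PySem.Set.add s (PySem.List.pyGetD g (i + (k : Int)) 0) else s)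
            acc (PySem.List.pyRange 0 ((g.length : Int) - k) 1) := by
          apply PySem.List.foldl_congr_mem
          intro s i hi
          rw [PySem.List.mem_pyRange_one] at hi
          have h1 : PySem.List.slice (g ++ [x]) (some i) (some (i + (k:Int)))
              = PySem.List.slice g (some i) (some (i + (k:Int))) := by
            rw [PySem.List.slice_toNat (g ++ [x]) (by omega) (by omega),
                PySem.List.slice_toNat g (by omega) (by omega)]
            rw [List.drop_append_of_le_length (by omega),
                List.take_append_of_le_length (by simp [List.length_drop]; omega)]
          have h2 : PySem.List.pyGetD (g ++ [x]) (i + (k:Int)) 0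
              = PySem.List.pyGetD g (i + (k:Int)) 0 := by
            rw [PySem.List.pyGetD_eq_getElem (g ++ [x]) 0 (by omega) (by simp; omega),
                PySem.List.pyGetD_eq_getElem g 0 (by omega) (by omega)]
            rw [List.getElem_append_left]
          rw [h1, h2]
        rw [hcong]
        have hcast : (g.length : Int) - k = ((g.length - k : Nat) : Int) := by omega
        have hslice : PySem.List.slice (g ++ [x]) (some ((g.length : Int) - k))
            (some (((g.length : Int) - k) + (k : Int))) = g.drop (g.length - k) := by
          rw [hcast, PySem.List.slice_natCast_add]
          rw [List.drop_append_of_le_length (by omega)]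
          rw [List.take_append_of_le_length (by simp [List.length_drop]; omega)]
          exact List.take_of_length_le (by simp [List.length_drop]; omega)
        have hget : PySem.List.pyGetD (g ++ [x]) (((g.length : Int) - k) + (k : Int)) 0 = x := by
          have h3 : ((g.length : Int) - k) + (k : Int) = ((g.length : Nat) : Int) := by omega
          rw [h3, PySem.List.pyGetD_natCast]; simp
        rw [hslice, hget]
        rw [Prod.mk.injEq]
        refine ⟨?_, ?_⟩
        · rcases Nat.eq_zero_or_pos k with hk0 | hk0
          · subst hk0; simp
          · rw [if_pos (by simp [hlen] : k < ((g.drop (g.length - k)) ++ [x]).length)]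
            rw [List.drop_append_of_le_length (by omega : 1 ≤ (g.drop (g.length - k)).length)]
            have h4 : (g ++ [x]).length - k = 1 + (g.length - k) := by simp; omega
            rw [h4, ← List.drop_drop]
            rw [List.drop_append_of_le_length (by omega : 1 ≤ g.length)]
            rw [List.drop_append_of_le_length (by rw [List.length_drop]; omega)]
            rw [List.drop_drop, List.drop_drop]
            rw [show g.length - k + 1 = 1 + (g.length - k) from by omega]
        · simp [hlen]
      · have hnil1 : PySem.List.pyRange 0 ((g.length : Int) - k) 1 = [] :=
          PySem.List.pyRange_one_eq_nil (by omega)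
        have hnil2 : PySem.List.pyRange 0 (((g.length : Int) - k) + 1) 1 = [] :=
          PySem.List.pyRange_one_eq_nil (by omega)
        rw [hnil1, hnil2]
        simp only [List.foldl_nil]
        have hd : g.length - k = 0 := by omega
        rw [hd, List.drop_zero, Prod.mk.injEq]
        refine ⟨?_, ?_⟩
        · rw [if_neg (show ¬ k < (g ++ [x]).length by simp; omega)]
          have h0 : (g ++ [x]).length - k = 0 := by simp; omega
          rw [h0, List.drop_zero]
        · rw [if_neg (show ¬ (g.length = k ∧ g = p) by rintro ⟨h, -⟩; omega)]

-- the two ports agree everywhere: A's dict lookup at the trailing prefix is B's window fold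
theorem main_eq (g : List Int) (n : Int) :
    no_repeat_ngram_mask_py g n = no_repeat_ngram_mask_py_alt g n := by
  unfold no_repeat_ngram_mask_py no_repeat_ngram_mask_py_alt
  by_cases hguard : n ≤ 0 ∨ (g.length : Int) < n - 1
  · rw [if_pos hguard, if_pos hguard]
  · rw [if_neg hguard, if_neg hguard]
    push_neg at hguard
    obtain ⟨hn0, hlen⟩ := hguard
    set k := (n - 1).toNat with hkdef
    simp only [show ∀ i : Int, i + n - 1 = i + (k : Int) from fun i => by omega,
               show (g.length : Int) - n + 1 = (g.length : Int) - k from by omega,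
               show -(n - 1) = -(k : Int) from by omega]
    rw [fold_modify_getD (fun i => PySem.List.slice g (some i) (some (i + (k:Int))))
        (fun i => PySem.List.pyGetD g (i + (k:Int)) 0)
        (PySem.List.slice g (some (-(k:Int))) none) _ PySem.Dict.empty]
    rw [window_fold k (PySem.List.slice g (some (-(k:Int))) none) g PySem.Set.empty]
    rfl

-- ===== VERDICT (by name: the statement is the Claim_ definition above) =====
theorem no_repeat_ngram_mask_py_spec : Claim_equal_no_repeat_ngram_mask_py := by
  intro g n _
  exact main_eq g n
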